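-- pv_equiv track=rewrite | github.com/MarcosNoble/2Pack-GAN | DNS_IP/DATASET/preparation_gan_condicional.py | packet_means
-- ===== SOURCE A (Python) =====
-- def packet_means(packet):
--     """Returns the means of the bytes of a packet
--
--     Args:
--         packet (string): Packet
--
--     Returns:
--         list: List of means of the bytes of a packet
--     """
--     packet_list = []
--     packet_with_mean = []
--
--     for i in range(0, len(packet), 2):
--         packet_list.append(packet[i:i+2])
--
--     for i in range(0, 14):
--         packet_list.append('00')
--
--     for i in range(0, len(packet_list)):
--         packet_with_mean.append(packet_list[i][:1] + '8')
--         packet_with_mean.append(packet_list[i][1:] + '8')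
--
--     return packet_with_mean
-- ===== SOURCE B (Python) =====
-- def packet_means(packet):
--     """Returns the means of the bytes of a packet (single pass over characters)."""
--     out = [c + '8' for c in packet]
--     if len(packet) % 2 == 1:
--         out.append('8')
--     out.extend(['08'] * 28)
--     return out
-- ===== Notes on version B (the rewrite author's own statement) =====
-- stated objective: simpler
-- what changed: B drops A's three loops and the intermediate 2-byte chunk list: one direct pass over the characters emits each character with the mean digit appended, a parity branch adds the lone trailing entry for odd-length packets, and the 14 zero-chunks of padding become one constant 28-element block.
import Mathlib
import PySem

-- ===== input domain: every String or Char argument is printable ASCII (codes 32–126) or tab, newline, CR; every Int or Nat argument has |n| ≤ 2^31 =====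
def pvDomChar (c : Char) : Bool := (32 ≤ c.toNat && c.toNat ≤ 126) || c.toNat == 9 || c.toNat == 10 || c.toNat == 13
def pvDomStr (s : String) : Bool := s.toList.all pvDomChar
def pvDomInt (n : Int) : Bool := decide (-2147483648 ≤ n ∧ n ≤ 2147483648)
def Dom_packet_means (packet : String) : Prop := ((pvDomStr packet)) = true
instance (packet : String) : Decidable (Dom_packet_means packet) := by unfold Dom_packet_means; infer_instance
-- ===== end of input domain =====

-- B replaces A's three loops and the intermediate chunk list with one pass over the
-- characters plus a parity branch and a constant padding block (objective: simpler).

-- ===== PORT A =====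
def packet_means (packet : String) : List String :=
  let chars := packet.toList
  let packet_list : List (List Char) :=
    (PySem.List.pyRange 0 (chars.length : Int) 2).foldl
      (fun acc i => acc ++ [PySem.List.slice chars (some i) (some (i + 2))]) []
  let packet_list :=
    (PySem.List.pyRange 0 14 1).foldl (fun acc _ => acc ++ [['0', '0']]) packet_list
  (PySem.List.pyRange 0 (packet_list.length : Int) 1).foldl
    (fun acc i =>
      let s := PySem.List.pyGetD packet_list i []
      acc ++ [String.ofList (PySem.List.slice s none (some 1) ++ ['8']),
              String.ofList (PySem.List.slice s (some 1) none ++ ['8'])]) []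

-- ===== PORT B =====
def packet_means_alt (packet : String) : List String :=
  (packet.toList.map (fun c => String.ofList [c, '8']))
    ++ (if packet.toList.length % 2 = 1 then [String.ofList ['8']] else [])
    ++ List.replicate 28 (String.ofList ['0', '8'])

-- ===== PRECONDITION & SPEC =====
def Spec_packet_means (packet : String) (out : List String) : Prop := out = packet_means_alt packet
instance (packet : String) (out : List String) : Decidable (Spec_packet_means packet out) := by unfold Spec_packet_means; infer_instance

-- ===== CLAIM (what is proved, stated in full; the proofs are below) =====
def Claim_equal_packet_means : Prop := ∀ (packet : String), Dom_packet_means packet → Spec_packet_means packet (packet_means packet)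

-- ===== LEMMAS AND PROOFS =====

/-- Proof-only helper: A's first loop produces the 2-character chunks of the input. -/
def chunk2 : List Char → List (List Char)
  | [] => []
  | [a] => [[a]]
  | a :: b :: t => [a, b] :: chunk2 t

theorem range_map_eq_chunk2 (l : List Char) :
    (List.range ((l.length + 1) / 2)).map (fun k => (l.drop (2 * k)).take 2) = chunk2 l := by
  induction l using chunk2.induct with
  | case1 => simp [chunk2]
  | case2 a => simp [chunk2, List.range_succ]
  | case3 a b t ih =>
    have hlen : ((a :: b :: t).length + 1) / 2 = (t.length + 1) / 2 + 1 := by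
      simp; omega
    rw [hlen, List.range_succ_eq_map, List.map_cons, List.map_map]
    simp only [chunk2]
    congr 1

theorem pyRange2_map_slice (l : List Char) :
    (PySem.List.pyRange 0 (l.length : Int) 2).map
        (fun i => PySem.List.slice l (some i) (some (i + 2))) = chunk2 l := by
  rw [PySem.List.pyRange_of_pos 0 (l.length : Int) (by norm_num)]
  have hn : (if (0 : Int) < (l.length : Int) then (((l.length : Int) - 0 + 2 - 1) / 2).toNat else 0)
      = (l.length + 1) / 2 := by split <;> omega
  rw [hn, List.map_map, ← range_map_eq_chunk2 l]
  apply List.map_congr_left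
  intro k _
  simp only [Function.comp, zero_add]
  have h1 : (2 : Int) * (k : Int) = ((2 * k : Nat) : Int) := by push_cast; ring
  have h2 : (2 : Int) * (k : Int) + 2 = ((2 * k : Nat) : Int) + ((2 : Nat) : Int) := by push_cast; ring
  rw [h2, h1, PySem.List.slice_natCast_add]

theorem chunk2_flatMap (l : List Char) :
    (chunk2 l).flatMap
        (fun s => [String.ofList (PySem.List.slice s none (some 1) ++ ['8']),
                   String.ofList (PySem.List.slice s (some 1) none ++ ['8'])])
      = l.map (fun c => String.ofList [c, '8'])
        ++ (if l.length % 2 = 1 then [String.ofList ['8']] else []) := by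
  induction l using chunk2.induct with
  | case1 => simp [chunk2]
  | case2 a =>
    rw [chunk2, List.flatMap_cons, PySem.List.slice_to _ (by norm_num : (0:Int) ≤ 1),
      PySem.List.slice_from_one]
    simp
  | case3 a b t ih =>
    rw [chunk2, List.flatMap_cons, ih, PySem.List.slice_to _ (by norm_num : (0:Int) ≤ 1),
      PySem.List.slice_from_one]
    have hpar : ((a :: b :: t).length % 2) = t.length % 2 := by
      simp only [List.length_cons]; omega
    simp only [List.length_cons] at hpar ⊢
    simp only [hpar]
    simp

-- ===== VERDICT (by name: the statement is the Claim_ definition above) =====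
theorem flatMap_pad :
    (List.replicate 14 (['0', '0'] : List Char)).flatMap
        (fun s => [String.ofList (PySem.List.slice s none (some 1) ++ ['8']),
                   String.ofList (PySem.List.slice s (some 1) none ++ ['8'])])
      = List.replicate 28 (String.ofList ['0', '8']) := by decide

theorem pad_map :
    (PySem.List.pyRange 0 14 1).map (fun _ => (['0', '0'] : List Char))
      = List.replicate 14 (['0', '0'] : List Char) := by decide

theorem packet_means_spec : Claim_equal_packet_means := by
  intro packet _
  unfold Spec_packet_means packet_means packet_means_alt
  simp only [PySem.List.foldl_append_singleton_eq_map, List.nil_append, pad_map,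
    pyRange2_map_slice]
  rw [PySem.List.foldl_pyRange_zero_pyGetD' (chunk2 packet.toList ++ List.replicate 14 ['0', '0'])
    [] (fun acc s => acc ++ [String.ofList (PySem.List.slice s none (some 1) ++ ['8']),
        String.ofList (PySem.List.slice s (some 1) none ++ ['8'])]) []]
  rw [PySem.List.foldl_append_eq_flatMap, List.flatMap_append, chunk2_flatMap, flatMap_pad]
  simp [List.append_assoc]
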